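-- pv_equiv track=rewrite | github.com/donut0310/Problem-Solving-Python- | Programmers/Level3/110 옮기기.py | solution
-- ===== SOURCE A (Python) =====
-- def solution(s):
--     answer = []
--
--     for word in s:
--         tmp, cnt = '', 0
--
--         for i in word:
--             tmp += i
--             if tmp[-3:] == '110':
--                 cnt += 1
--                 tmp = tmp[:-3]
--
--         target = '110' * cnt
--
--         for j in range(len(tmp)-1, -1, -1):
--             if tmp[j] == '0':
--                 tmp = tmp[:j + 1] + target + tmp[j+1:]
--                 break
--         else: tmp = target + tmp
--         answer.append(tmp)
--     return answer
-- ===== SOURCE B (Python) =====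
-- def solution(s):
--     answer = []
--     for word in s:
--         # single pass building the final answer's segments directly:
--         # before = everything up to (and including) the last surviving '0',
--         # after = surviving non-'1' tail chars, t = length of current run of '1's
--         before, after, t, cnt = [], [], 0, 0
--         for ch in word:
--             if ch == '1':
--                 t += 1
--             elif ch == '0':
--                 if t >= 2:
--                     t -= 2
--                     cnt += 1
--                 else:
--                     before += after + ['1'] * t + ['0']
--                     after, t = [], 0
--             else:
--                 after += ['1'] * t + [ch]
--                 t = 0
--         answer.append(''.join(before) + '110' * cnt + ''.join(after) + '1' * t)
--     return answer
-- ===== Notes on version B (the rewrite author's own statement) =====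
-- stated objective: alternative
-- what changed: A removes '110's onto a growing string with O(n) slicing per step and then re-scans backward for the last '0' and splices; B is a single forward pass with no removal/reinsertion phases: it tracks the run length of trailing '1's as a counter and accumulates the answer's three segments (prefix up to the last surviving '0', surviving tail, trailing ones) directly, concatenating them once at the end.
import Mathlib
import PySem

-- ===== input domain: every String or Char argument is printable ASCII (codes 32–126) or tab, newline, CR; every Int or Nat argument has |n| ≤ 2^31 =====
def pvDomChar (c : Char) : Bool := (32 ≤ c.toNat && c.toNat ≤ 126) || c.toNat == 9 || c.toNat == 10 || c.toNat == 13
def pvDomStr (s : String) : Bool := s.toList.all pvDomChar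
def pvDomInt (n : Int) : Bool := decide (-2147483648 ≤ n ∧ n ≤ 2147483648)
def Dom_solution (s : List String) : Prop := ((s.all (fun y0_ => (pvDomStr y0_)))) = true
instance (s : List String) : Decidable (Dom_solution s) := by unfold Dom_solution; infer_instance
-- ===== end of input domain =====

-- B replaces A's remove-then-reinsert scheme (stack removal of '110', backward scan for the
-- last '0', splice) by a single forward pass that builds the answer's segments directly
-- (prefix up to the last surviving '0', surviving tail, run of trailing '1's) — objective: alternative.

-- ===== PORT A =====
-- inner loop of A: tmp += i; if tmp[-3:] == '110': cnt += 1; tmp = tmp[:-3]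
def aStep (st : List Char × Int) (c : Char) : List Char × Int :=
  let tmp := st.1 ++ [c]
  if PySem.List.slice tmp (some (-3)) none == ['1', '1', '0'] then
    (PySem.List.slice tmp none (some (-3)), st.2 + 1)
  else (tmp, st.2)

-- A's 'for j in range(len(tmp)-1, -1, -1): … else:' loop, fuel j+1 ↔ index j
def aIns (tmp target : List Char) : Nat → List Char
  | 0 => target ++ tmp
  | j + 1 =>
    if PySem.List.pyGet? tmp (j : Int) == some '0' then
      PySem.List.slice tmp none (some ((j : Int) + 1)) ++ target ++
        PySem.List.slice tmp (some ((j : Int) + 1)) none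
    else aIns tmp target j

def solution (s : List String) : List String :=
  s.foldl (fun answer word =>
    let st := word.toList.foldl aStep ([], 0)
    let target := PySem.List.pyRepeat ['1', '1', '0'] st.2
    answer ++ [String.ofList (aIns st.1 target st.1.length)]) []

-- ===== PORT B =====
-- B's inner loop body over state (before, after, t, cnt)
def bStep (st : List Char × List Char × Int × Int) (c : Char) :
    List Char × List Char × Int × Int :=
  let before := st.1; let after := st.2.1; let t := st.2.2.1; let cnt := st.2.2.2
  if c == '1' then (before, after, t + 1, cnt)
  else if c == '0' then
    if 2 ≤ t then (before, after, t - 2, cnt + 1)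
    else (before ++ (after ++ PySem.List.pyRepeat ['1'] t ++ ['0']), [], 0, cnt)
  else (before, after ++ PySem.List.pyRepeat ['1'] t ++ [c], 0, cnt)

def solution_alt (s : List String) : List String :=
  s.foldl (fun answer word =>
    let st := word.toList.foldl bStep ([], [], 0, 0)
    answer ++ [String.ofList (st.1 ++ PySem.List.pyRepeat ['1', '1', '0'] st.2.2.2 ++
      st.2.1 ++ PySem.List.pyRepeat ['1'] st.2.2.1)]) []

-- ===== PRECONDITION & SPEC =====
def Spec_solution (s : List String) (out : List String) : Prop := out = solution_alt s
instance (s : List String) (out : List String) : Decidable (Spec_solution s out) := by unfold Spec_solution; infer_instance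

-- ===== CLAIM (what is proved, stated in full; the proofs are below) =====
def Claim_equal_solution : Prop := ∀ (s : List String), Dom_solution s → Spec_solution s (solution s)

-- ===== LEMMAS AND PROOFS =====

-- the simulation invariant: A's state (tmp, cnt) against B's state (before, after, t, cnt)
def SimInv (a : List Char × Int) (b : List Char × List Char × Int × Int) : Prop :=
  a.1 = b.1 ++ b.2.1 ++ List.replicate b.2.2.1.toNat '1' ∧
  a.2 = b.2.2.2 ∧
  (b.1 = [] ∨ b.1.getLast? = some '0') ∧
  (∀ x ∈ b.2.1, x ≠ '0') ∧
  (b.2.1 = [] ∨ b.2.1.getLast? ≠ some '1') ∧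
  0 ≤ b.2.2.1

-- the last three characters of a list ending in three explicit characters
lemma slice_last3 (zs : List Char) (a b c : Char) :
    PySem.List.slice (zs ++ [a, b, c]) (some (-3)) none = [a, b, c] := by
  simp [PySem.List.slice, PySem.List.clampIdx]
  split <;> omega

lemma slice_drop3 (zs : List Char) (a b c : Char) :
    PySem.List.slice (zs ++ [a, b, c]) none (some (-3)) = zs := by
  simp [PySem.List.slice, PySem.List.clampIdx]

-- the '110' check fails when the appended char is not '0'
lemma check_ne_last (xs : List Char) (c : Char) (hc : c ≠ '0') :
    ¬ PySem.List.slice (xs ++ [c]) (some (-3)) none = ['1', '1', '0'] := by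
  rcases xs.eq_nil_or_concat with rfl | ⟨ys, b, rfl⟩
  · simp [PySem.List.slice, PySem.List.clampIdx]
  rcases ys.eq_nil_or_concat with rfl | ⟨zs, a, rfl⟩
  · simp [PySem.List.slice, PySem.List.clampIdx]
  · simp only [List.concat_eq_append]
    have h1 : zs ++ [a] ++ [b] ++ [c] = zs ++ [a, b, c] := by simp
    rw [h1, slice_last3]
    simp [hc]

-- the '110' check fails when the char below the top two is not '1'
lemma check_ne_mid (xs : List Char) (b c : Char) (hb : b ≠ '1') :
    ¬ PySem.List.slice (xs ++ [b, c]) (some (-3)) none = ['1', '1', '0'] := by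
  rcases xs.eq_nil_or_concat with rfl | ⟨zs, a, rfl⟩
  · simp [PySem.List.slice, PySem.List.clampIdx, hb]
  · simp only [List.concat_eq_append]
    have h1 : zs ++ [a] ++ [b, c] = zs ++ [a, b, c] := by simp
    rw [h1, slice_last3]
    simp [hb]

-- evaluation equations for the two step functions
lemma aStep_pop (tmp : List Char) (cnt : Int) (c : Char)
    (h : PySem.List.slice (tmp ++ [c]) (some (-3)) none = ['1', '1', '0']) :
    aStep (tmp, cnt) c = (PySem.List.slice (tmp ++ [c]) none (some (-3)), cnt + 1) := by
  simp [aStep, h]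

lemma aStep_push (tmp : List Char) (cnt : Int) (c : Char)
    (h : ¬ PySem.List.slice (tmp ++ [c]) (some (-3)) none = ['1', '1', '0']) :
    aStep (tmp, cnt) c = (tmp ++ [c], cnt) := by
  simp [aStep, h]

lemma bStep_one (before after : List Char) (t cnt : Int) :
    bStep (before, after, t, cnt) '1' = (before, after, t + 1, cnt) := by
  simp [bStep]

lemma bStep_zero_pop (before after : List Char) (t cnt : Int) (h : 2 ≤ t) :
    bStep (before, after, t, cnt) '0' = (before, after, t - 2, cnt + 1) := by
  simp [bStep, h]

lemma bStep_zero_push (before after : List Char) (t cnt : Int) (h : ¬ 2 ≤ t) :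
    bStep (before, after, t, cnt) '0' =
      (before ++ (after ++ PySem.List.pyRepeat ['1'] t ++ ['0']), [], 0, cnt) := by
  simp [bStep, h]

lemma bStep_other (before after : List Char) (t cnt : Int) (c : Char)
    (h1 : c ≠ '1') (h0 : c ≠ '0') :
    bStep (before, after, t, cnt) c =
      (before, after ++ PySem.List.pyRepeat ['1'] t ++ [c], 0, cnt) := by
  simp [bStep, h1, h0]

-- replicate split off two elements
lemma replicate_split2 (m : Nat) :
    List.replicate (m + 2) '1' = List.replicate m '1' ++ ['1', '1'] := by
  rw [show m + 2 = (m + 1) + 1 from rfl, List.replicate_succ', List.replicate_succ']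
  simp

-- one step of A simulated by one step of B
lemma step_inv (a : List Char × Int) (b : List Char × List Char × Int × Int) (c : Char)
    (h : SimInv a b) : SimInv (aStep a c) (bStep b c) := by
  obtain ⟨before, after, t, cnt⟩ := b
  obtain ⟨tmp, acnt⟩ := a
  obtain ⟨htmp, hcnt, hbef, haft, haftl, ht⟩ := h
  simp only at htmp hcnt hbef haft haftl ht
  subst htmp hcnt
  by_cases h1 : c = '1'
  · -- push a '1' : the check cannot fire
    subst h1
    rw [aStep_push _ _ _ (check_ne_last _ '1' (by decide)), bStep_one]
    refine ⟨?_, rfl, hbef, haft, haftl, show (0:Int) ≤ t + 1 by omega⟩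
    have hrep : (t + 1).toNat = t.toNat + 1 := by omega
    simp [hrep, List.replicate_succ']
  by_cases h0 : c = '0'
  · subst h0
    by_cases ht2 : 2 ≤ t
    · -- pop: the stack ends in ['1','1','0']
      have hk : t.toNat = (t - 2).toNat + 2 := by omega
      have hsplit : (before ++ after ++ List.replicate t.toNat '1') ++ ['0'] =
          (before ++ after ++ List.replicate (t - 2).toNat '1') ++ ['1', '1', '0'] := by
        rw [hk, replicate_split2]
        simp
      rw [aStep_pop _ _ _ (by rw [hsplit]; exact slice_last3 _ '1' '1' '0'),
        bStep_zero_pop _ _ _ _ ht2]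
      rw [hsplit, slice_drop3]
      exact ⟨rfl, rfl, hbef, haft, haftl, show (0:Int) ≤ t - 2 by omega⟩
    · -- no pop: the check cannot fire (t ≤ 1, and below the run nothing ends in '1')
      have hch : ¬ PySem.List.slice
          ((before ++ after ++ List.replicate t.toNat '1') ++ ['0']) (some (-3)) none
            = ['1', '1', '0'] := by
        have hlast : ∀ ys : List Char, (ys = [] ∨ ys.getLast? ≠ some '1') →
            ¬ PySem.List.slice ((ys ++ List.replicate t.toNat '1') ++ ['0'])
              (some (-3)) none = ['1', '1', '0'] := by
          intro ys hys
          have htt : t.toNat = 0 ∨ t.toNat = 1 := by omega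
          rcases htt with htt | htt <;> rw [htt]
          · -- run empty: pattern would need ys to end in '1'
            rcases hys with rfl | hl
            · decide
            rcases ys.eq_nil_or_concat with rfl | ⟨ws, d, rfl⟩
            · decide
            · have hd : d ≠ '1' := by simpa using hl
              simp only [List.concat_eq_append, List.replicate, List.append_nil]
              rw [show ws ++ [d] ++ ['0'] = ws ++ [d, '0'] from by simp]
              exact check_ne_mid ws d '0' hd
          · -- run of length one: pattern would need ys to end in '1'
            rcases hys with rfl | hl
            · decide
            rcases ys.eq_nil_or_concat with rfl | ⟨ws, d, rfl⟩
            · decide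
            · have hd : d ≠ '1' := by simpa using hl
              simp only [List.concat_eq_append, List.replicate]
              rw [show ws ++ [d] ++ ['1'] ++ ['0'] = (ws ++ [d]) ++ ['1', '0'] from by simp,
                show (ws ++ [d]) ++ ['1', '0'] = ws ++ [d, '1', '0'] from by simp, slice_last3]
              simp [hd]
        have hys : before ++ after = [] ∨ (before ++ after).getLast? ≠ some '1' := by
          rcases after.eq_nil_or_concat with rfl | ⟨ws, d, rfl⟩
          · rcases hbef with rfl | hb
            · exact Or.inl (by simp)
            · right
              simp only [List.append_nil]
              rw [hb]; decide
          · right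
            have hd : d ≠ '1' := by
              rcases haftl with h | hl
              · simp at h
              · simpa using hl
            simp only [List.concat_eq_append]
            rw [show before ++ (ws ++ [d]) = (before ++ ws) ++ [d] from by simp]
            simp [hd]
        have := hlast (before ++ after) hys
        simpa [List.append_assoc] using this
      rw [aStep_push _ _ _ hch, bStep_zero_push _ _ _ _ ht2]
      refine ⟨?_, rfl, Or.inr (by simp), by simp, Or.inl rfl, le_refl 0⟩
      simp [PySem.List.pyRepeat_singleton]
  · -- any other character: pushed, flushing the run into after
    rw [aStep_push _ _ _ (check_ne_last _ c h0), bStep_other _ _ _ _ _ h1 h0]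
    refine ⟨?_, rfl, hbef, ?_, Or.inr (by simp [h1]), le_refl 0⟩
    · simp [PySem.List.pyRepeat_singleton]
    · intro x hx
      simp [PySem.List.pyRepeat_singleton] at hx
      rcases hx with hx | hx | rfl
      · exact haft x hx
      · rw [hx.2]; decide
      · exact h0

-- the invariant holds after folding any word from the initial states
lemma fold_inv (w : List Char) :
    SimInv (w.foldl aStep ([], 0)) (w.foldl bStep ([], [], 0, 0)) := by
  have h0 : SimInv ([], 0) ([], [], 0, 0) := by
    refine ⟨by simp, rfl, Or.inl rfl, by simp, Or.inl rfl, le_refl 0⟩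
  -- generalize over the two states
  suffices h : ∀ (a : List Char × Int) (b : List Char × List Char × Int × Int),
      SimInv a b → SimInv (w.foldl aStep a) (w.foldl bStep b) from h _ _ h0
  induction w with
  | nil => intro a b h; exact h
  | cons c w ih => intro a b h; exact ih _ _ (step_inv a b c h)

-- A's backward reinsertion loop, evaluated on a stack of shape before ++ rest with
-- '0' occurring only as the last char of before
lemma aIns_skip (tmp target : List Char) (k : Nat) (rest : List Char)
    (hk : k + rest.length ≤ tmp.length)
    (hget : ∀ i, k ≤ i → i < tmp.length → tmp[i]? ≠ some '0') :
    aIns tmp target (k + rest.length) = aIns tmp target k := by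
  induction rest using List.reverseRecOn with
  | nil => simp
  | append_singleton r c ihr =>
    have hlen : k + (r ++ [c]).length = (k + r.length) + 1 := by simp [Nat.add_assoc]
    rw [hlen, aIns]
    have hidx : (k + r.length) < tmp.length := by simp at hk; omega
    have hne : tmp[(k + r.length)]? ≠ some '0' := hget _ (by omega) hidx
    have hg : PySem.List.pyGet? tmp ((k + r.length : Nat) : Int) = tmp[(k + r.length)]? :=
      PySem.List.pyGet?_natCast tmp _
    rw [if_neg (by push_cast at hg; simp [hg, hne])]
    exact ihr (by simp at hk ⊢; omega)

-- final assembly: A's reinsertion on a stack satisfying the invariant's shape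
lemma aIns_final (before rest target : List Char)
    (hbef : before = [] ∨ before.getLast? = some '0')
    (hrest : ∀ x ∈ rest, x ≠ '0') :
    aIns (before ++ rest) target (before ++ rest).length =
      before ++ target ++ rest := by
  have hlen : (before ++ rest).length = before.length + rest.length := by simp
  have hget : ∀ i, before.length ≤ i → i < (before ++ rest).length →
      (before ++ rest)[i]? ≠ some '0' := by
    intro i h1 h2
    rw [List.getElem?_append_right h1]
    intro hc
    have hi : i - before.length < rest.length := by simp at h2; omega
    rw [List.getElem?_eq_getElem hi] at hc
    exact hrest _ (List.getElem_mem hi) (by simpa using hc)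
  rw [hlen, aIns_skip (before ++ rest) target before.length rest (by simp) hget]
  rcases hbef with rfl | hb
  · simp [aIns]
  · rcases before.eq_nil_or_concat with rfl | ⟨ws, d, rfl⟩
    · simp at hb
    · have hd : d = '0' := by simpa using hb
      subst hd
      simp only [List.concat_eq_append]
      have hlb : (ws ++ ['0']).length = ws.length + 1 := by simp
      rw [hlb, aIns]
      have hidx : ws.length < (ws ++ ['0'] ++ rest).length := by simp
      have hg : PySem.List.pyGet? (ws ++ ['0'] ++ rest) ((ws.length : Nat) : Int) =
          (ws ++ ['0'] ++ rest)[ws.length]? := PySem.List.pyGet?_natCast _ _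
      have hv : (ws ++ ['0'] ++ rest)[ws.length]? = some '0' := by
        rw [show ws ++ ['0'] ++ rest = ws ++ ('0' :: rest) from by simp]
        rw [List.getElem?_append_right (le_refl _)]
        simp
      rw [if_pos (by rw [hg, hv]; decide)]
      have hc1 : ((ws.length : Int) + 1) = ((ws.length + 1 : Nat) : Int) := by push_cast; ring
      rw [hc1, PySem.List.slice_to_natCast, PySem.List.slice_from_natCast]
      have : ws ++ ['0'] ++ rest = (ws ++ ['0']) ++ rest := by simp
      rw [this, List.take_append_of_le_length (by simp), List.drop_append_of_le_length (by simp)]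
      rw [← hlb, List.take_length]
      simp

-- per-word equality of the two loop bodies
lemma word_eq (answer : List String) (word : String) :
    (let st := word.toList.foldl aStep ([], 0)
     let target := PySem.List.pyRepeat ['1', '1', '0'] st.2
     answer ++ [String.ofList (aIns st.1 target st.1.length)]) =
    (let st := word.toList.foldl bStep ([], [], 0, 0)
     answer ++ [String.ofList (st.1 ++ PySem.List.pyRepeat ['1', '1', '0'] st.2.2.2 ++
       st.2.1 ++ PySem.List.pyRepeat ['1'] st.2.2.1)]) := by
  have hinv := fold_inv word.toList
  dsimp only
  obtain ⟨htmp, hcnt, hbef, haft, haftl, ht⟩ := hinv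
  set b := word.toList.foldl bStep ([], [], 0, 0) with hb
  have hrest : ∀ x ∈ b.2.1 ++ List.replicate b.2.2.1.toNat '1', x ≠ '0' := by
    intro x hx
    rcases List.mem_append.1 hx with hx | hx
    · exact haft x hx
    · rw [List.eq_of_mem_replicate hx]; decide
  have h1 : (word.toList.foldl aStep ([], 0)).1 =
      b.1 ++ (b.2.1 ++ List.replicate b.2.2.1.toNat '1') := by
    rw [htmp]; simp
  rw [h1, hcnt, aIns_final b.1 _ _ hbef hrest]
  simp [PySem.List.pyRepeat_singleton]

-- ===== VERDICT (by name: the statement is the Claim_ definition above) =====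
theorem solution_spec : Claim_equal_solution := by
  intro s _
  unfold Spec_solution solution solution_alt
  exact congrArg (fun f => List.foldl f ([] : List String) s)
    (funext fun answer => funext fun word => word_eq answer word)
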